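-- pv_equiv track=rewrite | github.com/ahervi/Bluetooth-Tracking-Random-Forests | Analysis/Scripts_and_images/other_scripts/graphMinutesAlt.py | timeseparation
-- ===== SOURCE A (Python) =====
-- def timeseparation(XconsecutiveSignalCombinaisons, minutes):
-- 	bufferRSSIS = []
-- 	newXconsecutiveSignalCombinaisons = []
-- 	oldTime = XconsecutiveSignalCombinaisons[0][1]
-- 	for v in range(len(XconsecutiveSignalCombinaisons)):
--
-- 		if XconsecutiveSignalCombinaisons[v][1] - oldTime > 60*minutes:
-- 			oldTime = XconsecutiveSignalCombinaisons[v][1]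
-- 			newXconsecutiveSignalCombinaisons.append(bufferRSSIS)
-- 			bufferRSSIS = []
-- 		bufferRSSIS.append(XconsecutiveSignalCombinaisons[v][0])
-- 	return newXconsecutiveSignalCombinaisons
-- ===== SOURCE B (Python) =====
-- def timeseparation(XconsecutiveSignalCombinaisons, minutes):
--     # Pass 1: collect the indices where a new bucket starts.
--     cuts = [0]
--     start = XconsecutiveSignalCombinaisons[0][1]
--     for v, (_, t) in enumerate(XconsecutiveSignalCombinaisons):
--         if t - start > 60 * minutes:
--             start = t
--             cuts.append(v)
--     # Pass 2: slice the value list at consecutive cut points; the final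
--     # (still-open) bucket has no closing cut, so it is not emitted.
--     values = [x[0] for x in XconsecutiveSignalCombinaisons]
--     return [values[cuts[i]:cuts[i + 1]] for i in range(len(cuts) - 1)]
-- ===== Notes on version B (the rewrite author's own statement) =====
-- stated objective: alternative
-- what changed: B replaces A's single-pass bucket accumulator (mutable buffer appended element by element) by a two-pass scheme: a first scan collects only the boundary indices where a new bucket starts, a second pass slices the value list at consecutive boundaries, which drops the final open bucket for free.
import Mathlib
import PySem

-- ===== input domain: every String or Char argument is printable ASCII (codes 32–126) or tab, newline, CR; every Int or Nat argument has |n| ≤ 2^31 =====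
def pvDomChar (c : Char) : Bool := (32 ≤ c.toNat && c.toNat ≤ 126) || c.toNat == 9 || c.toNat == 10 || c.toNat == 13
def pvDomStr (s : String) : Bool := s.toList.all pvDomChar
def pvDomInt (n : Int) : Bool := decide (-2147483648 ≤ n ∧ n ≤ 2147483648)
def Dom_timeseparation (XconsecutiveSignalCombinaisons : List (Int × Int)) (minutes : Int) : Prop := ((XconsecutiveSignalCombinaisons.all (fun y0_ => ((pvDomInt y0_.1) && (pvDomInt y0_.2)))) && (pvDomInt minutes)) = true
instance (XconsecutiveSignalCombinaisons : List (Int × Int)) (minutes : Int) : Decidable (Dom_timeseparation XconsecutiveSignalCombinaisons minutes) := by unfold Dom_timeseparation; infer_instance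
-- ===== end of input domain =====

-- B is an alternative decomposition: a first scan collects only the bucket-boundary
-- indices, a second pass slices the value list at consecutive boundaries (the final
-- open bucket has no closing boundary and so is dropped, as in A).

-- ===== PORT A =====
-- loop body of A: (buffer, groups, oldTime) updated per element
def stepA (minutes : Int) (s : List Int × List (List Int) × Int) (p : Int × Int) :
    List Int × List (List Int) × Int :=
  if p.2 - s.2.2 > 60 * minutes then ([p.1], s.2.1 ++ [s.1], p.2)
  else (s.1 ++ [p.1], s.2.1, s.2.2)

def timeseparation (XconsecutiveSignalCombinaisons : List (Int × Int)) (minutes : Int) : List (List Int) :=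
  match XconsecutiveSignalCombinaisons with
  | [] => []   -- unreachable: Python raises IndexError on X[0][1]; excluded by Pre_
  | x0 :: _ =>
    (XconsecutiveSignalCombinaisons.foldl (stepA minutes) ([], [], x0.2)).2.1

-- ===== PORT B =====
-- loop body of B's first pass: (cuts, start) updated per (index, element)
def stepB (minutes : Int) (s : List Int × Int) (p : Int × (Int × Int)) : List Int × Int :=
  if p.2.2 - s.2 > 60 * minutes then (s.1 ++ [p.1], p.2.2) else s

def timeseparation_alt (XconsecutiveSignalCombinaisons : List (Int × Int)) (minutes : Int) : List (List Int) :=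
  match XconsecutiveSignalCombinaisons with
  | [] => []   -- unreachable: Python raises IndexError on X[0][1]; excluded by Pre_
  | x0 :: _ =>
    let cuts := ((PySem.List.enumerate XconsecutiveSignalCombinaisons 0).foldl
        (stepB minutes) ([0], x0.2)).1
    let values := XconsecutiveSignalCombinaisons.map Prod.fst
    (PySem.List.pyRange 0 ((cuts.length : Int) - 1) 1).map (fun i =>
      PySem.List.slice values (some (PySem.List.pyGetD cuts i 0))
        (some (PySem.List.pyGetD cuts (i + 1) 0)))

-- ===== PRECONDITION & SPEC =====
-- Pre_ excludes only the empty list, on which both Pythons raise IndexError at X[0][1].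
def Pre_timeseparation (XconsecutiveSignalCombinaisons : List (Int × Int)) (minutes : Int) : Prop :=
  XconsecutiveSignalCombinaisons ≠ []
instance (XconsecutiveSignalCombinaisons : List (Int × Int)) (minutes : Int) : Decidable (Pre_timeseparation XconsecutiveSignalCombinaisons minutes) := by unfold Pre_timeseparation; infer_instance

def pvWitness_timeseparation : (List (Int × Int)) × Int := ([(1, 0), (2, 100)], 1)

def Spec_timeseparation (XconsecutiveSignalCombinaisons : List (Int × Int)) (minutes : Int) (out : List (List Int)) : Prop := out = timeseparation_alt XconsecutiveSignalCombinaisons minutes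
instance (XconsecutiveSignalCombinaisons : List (Int × Int)) (minutes : Int) (out : List (List Int)) : Decidable (Spec_timeseparation XconsecutiveSignalCombinaisons minutes out) := by unfold Spec_timeseparation; infer_instance

-- ===== CLAIM (what is proved, stated in full; the proofs are below) =====
def Claim_equal_timeseparation : Prop := ∀ (XconsecutiveSignalCombinaisons : List (Int × Int)) (minutes : Int), Dom_timeseparation XconsecutiveSignalCombinaisons minutes → Pre_timeseparation XconsecutiveSignalCombinaisons minutes → Spec_timeseparation XconsecutiveSignalCombinaisons minutes (timeseparation XconsecutiveSignalCombinaisons minutes)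

-- ===== LEMMAS AND PROOFS =====

-- common recursive characterisation of the emitted buckets
def go (minutes : Int) : List (Int × Int) → Int → List Int → List (List Int)
  | [], _, _ => []
  | p :: ys, start, buf =>
    if p.2 - start > 60 * minutes then buf :: go minutes ys p.2 [p.1]
    else go minutes ys start (buf ++ [p.1])

lemma foldA_go (minutes : Int) (ys : List (Int × Int)) :
    ∀ (buf : List Int) (groups : List (List Int)) (start : Int),
      (ys.foldl (stepA minutes) (buf, groups, start)).2.1
        = groups ++ go minutes ys start buf := by
  induction ys with
  | nil => intro buf groups start; simp [go]
  | cons p ys ih =>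
    intro buf groups start
    simp only [List.foldl_cons, stepA, go]
    split_ifs <;> simp [ih]

-- buckets read off a boundary list (Int indices, toNat-based slicing)
def segsI (vs : List Int) : List Int → List (List Int)
  | a :: c :: r => ((vs.drop a.toNat).take (c.toNat - a.toNat)) :: segsI vs (c :: r)
  | _ => []

lemma segsI_append (vs : List Int) :
    ∀ (xs : List Int) (b : Int) (rest : List Int),
      segsI vs (xs ++ b :: rest) = segsI vs (xs ++ [b]) ++ segsI vs (b :: rest) := by
  intro xs
  induction xs with
  | nil => intro b rest; simp [segsI]
  | cons a xs ih =>
    intro b rest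
    cases xs with
    | nil => simp [segsI]
    | cons c r =>
      simp only [List.cons_append] at ih ⊢
      simp only [segsI, ih b rest, List.cons_append]

-- B's second pass (pyRange + pyGetD + slice) computes segsI for nonnegative cuts
lemma outExpr_eq_segsI (vs : List Int) :
    ∀ (cuts : List Int), (∀ x ∈ cuts, 0 ≤ x) →
      (PySem.List.pyRange 0 ((cuts.length : Int) - 1) 1).map (fun i =>
        PySem.List.slice vs (some (PySem.List.pyGetD cuts i 0))
          (some (PySem.List.pyGetD cuts (i + 1) 0))) = segsI vs cuts := by
  intro cuts
  induction cuts with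
  | nil => intro _; simp [segsI, PySem.List.pyRange_one_eq_nil]
  | cons a rest ih =>
    intro h
    cases rest with
    | nil => simp [segsI, PySem.List.pyRange_one_eq_nil]
    | cons c r =>
      have ha : 0 ≤ a := h a (by simp)
      have hc : 0 ≤ c := h c (by simp)
      have hlen : ((((a :: c :: r).length : Nat) : Int) - 1) = ((c :: r).length : Int) := by
        simp
      rw [hlen]
      have hcons : PySem.List.pyRange 0 ((c :: r).length : Int) 1
          = 0 :: PySem.List.pyRange 1 ((c :: r).length : Int) 1 := by
        exact PySem.List.pyRange_one_cons (by exact_mod_cast Nat.succ_pos r.length)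
      rw [hcons]
      simp only [List.map_cons]
      have h0 : PySem.List.pyGetD (a :: c :: r) (0 : Int) 0 = a :=
        PySem.List.pyGetD_zero_cons _ _ _
      have h1 : PySem.List.pyGetD (a :: c :: r) ((0 : Int) + 1) 0 = c := by
        have h' := PySem.List.pyGetD_natCast (a :: c :: r) 1 0
        norm_num at h'
        norm_num [h']
      rw [h0, h1, PySem.List.slice_toNat vs ha hc]
      have htail : (PySem.List.pyRange 1 ((c :: r).length : Int) 1).map (fun i =>
            PySem.List.slice vs (some (PySem.List.pyGetD (a :: c :: r) i 0))
              (some (PySem.List.pyGetD (a :: c :: r) (i + 1) 0)))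
          = (PySem.List.pyRange 0 (((c :: r).length : Int) - 1) 1).map (fun i =>
            PySem.List.slice vs (some (PySem.List.pyGetD (c :: r) i 0))
              (some (PySem.List.pyGetD (c :: r) (i + 1) 0))) := by
        rw [PySem.List.pyRange_one, PySem.List.pyRange_one]
        simp only [List.map_map, Int.sub_zero]
        apply List.map_congr_left
        intro k hk
        simp only [Function.comp]
        have e1 : (1 : Int) + (k : Int) = ((k + 1 : Nat) : Int) := by push_cast; ring
        have e2 : (1 : Int) + (k : Int) + 1 = ((k + 2 : Nat) : Int) := by push_cast; ring
        have e3 : (0 : Int) + (k : Int) = ((k : Nat) : Int) := by ring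
        have e4 : (0 : Int) + (k : Int) + 1 = ((k + 1 : Nat) : Int) := by push_cast; ring
        rw [e2, e1, e4, e3, PySem.List.pyGetD_natCast, PySem.List.pyGetD_natCast,
          PySem.List.pyGetD_natCast, PySem.List.pyGetD_natCast]
        simp [List.getD]
      rw [htail, ih (fun x hx => h x (by simp [hx]))]
      simp [segsI]

-- the first pass of B keeps every cut index nonnegative
lemma foldB_nonneg (minutes : Int) :
    ∀ (ys : List (Int × Int)) (k : Int) (cuts : List Int) (start : Int),
      0 ≤ k → (∀ x ∈ cuts, 0 ≤ x) →
      ∀ x ∈ ((PySem.List.enumerate ys k).foldl (stepB minutes) (cuts, start)).1, 0 ≤ x := by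
  intro ys
  induction ys with
  | nil => intro k cuts start _ hc x hx; simp [PySem.List.enumerate_nil] at hx; exact hc x hx
  | cons p ys ih =>
    intro k cuts start hk hc x hx
    rw [PySem.List.enumerate_cons, List.foldl_cons] at hx
    unfold stepB at hx
    split_ifs at hx with h
    · exact ih (k + 1) (cuts ++ [k]) p.2 (by omega)
        (by intro y hy; rcases List.mem_append.mp hy with hy | hy
            · exact hc y hy
            · simp at hy; omega) x hx
    · exact ih (k + 1) cuts start (by omega) hc x hx

-- main invariant: B's boundary fold tracks A's bucket recursion
lemma foldB_inv (minutes : Int) :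
    ∀ (ys : List (Int × Int)) (pre : List Int) (cuts : List Int) (b : Nat) (start : Int),
      b ≤ pre.length →
      segsI (pre ++ ys.map Prod.fst)
          (((PySem.List.enumerate ys (pre.length : Int)).foldl (stepB minutes)
            (cuts ++ [(b : Int)], start)).1)
        = segsI (pre ++ ys.map Prod.fst) (cuts ++ [(b : Int)])
            ++ go minutes ys start (pre.drop b) := by
  intro ys
  induction ys with
  | nil =>
    intro pre cuts b start hb
    simp [PySem.List.enumerate_nil, go]
  | cons p ys ih =>
    intro pre cuts b start hb
    rw [PySem.List.enumerate_cons, List.foldl_cons]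
    have hvs : pre ++ (p :: ys).map Prod.fst = (pre ++ [p.1]) ++ ys.map Prod.fst := by
      simp
    have hlen : (pre.length : Int) + 1 = ((pre ++ [p.1]).length : Int) := by
      simp
    by_cases h : p.2 - start > 60 * minutes
    · have hstep : stepB minutes (cuts ++ [(b : Int)], start) ((pre.length : Int), p)
          = ((cuts ++ [(b : Int)]) ++ [((pre.length : Nat) : Int)], p.2) := by
        unfold stepB; simp [h]
      rw [hstep, hvs, hlen]
      rw [ih (pre ++ [p.1]) (cuts ++ [(b : Int)]) pre.length p.2 (by simp)]
      have hdrop : (pre ++ [p.1]).drop pre.length = [p.1] := by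
        simp
      rw [hdrop]
      have hgo : go minutes (p :: ys) start (pre.drop b)
          = pre.drop b :: go minutes ys p.2 [p.1] := by
        simp only [go]; rw [if_pos h]
      rw [hgo]
      have hsplit := segsI_append (pre ++ p.1 :: ys.map Prod.fst) cuts ((b : Int))
        [((pre.length : Nat) : Int)]
      have hseg : segsI (pre ++ p.1 :: ys.map Prod.fst)
          [((b : Int)), ((pre.length : Nat) : Int)] = [pre.drop b] := by
        have hbuf : ((pre ++ p.1 :: ys.map Prod.fst).drop b).take (pre.length - b)
            = pre.drop b := by
          rw [List.drop_append_of_le_length hb]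
          exact List.take_left' (by simp [List.length_drop])
        simp [segsI, hbuf]
      simp only [List.append_assoc, List.cons_append, List.nil_append] at hsplit ⊢
      rw [hsplit, hseg]
      simp
    · have hstep : stepB minutes (cuts ++ [(b : Int)], start) ((pre.length : Int), p)
          = (cuts ++ [(b : Int)], start) := by
        unfold stepB; simp [h]
      rw [hstep, hvs, hlen]
      rw [ih (pre ++ [p.1]) cuts b start (by simp; omega)]
      have hdrop : (pre ++ [p.1]).drop b = pre.drop b ++ [p.1] :=
        List.drop_append_of_le_length hb
      rw [hdrop]
      have hgo : go minutes (p :: ys) start (pre.drop b)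
          = go minutes ys start (pre.drop b ++ [p.1]) := by
        simp only [go]; rw [if_neg h]
      rw [hgo]

-- ===== VERDICT (by name: the statement is the Claim_ definition above) =====
theorem timeseparation_spec : Claim_equal_timeseparation := by
  intro X minutes _ hpre
  unfold Spec_timeseparation
  match X with
  | [] => exact absurd rfl hpre
  | x0 :: rest =>
    unfold timeseparation timeseparation_alt
    simp only
    rw [foldA_go]
    have hnn : ∀ x ∈ ((PySem.List.enumerate (x0 :: rest) 0).foldl (stepB minutes)
        ([0], x0.2)).1, 0 ≤ x :=
      foldB_nonneg minutes (x0 :: rest) 0 [0] x0.2 le_rfl (by simp)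
    rw [outExpr_eq_segsI _ _ hnn]
    have h0 : ([0] : List Int) = [] ++ [((0 : Nat) : Int)] := by norm_num
    have hk : (0 : Int) = ((([] : List Int).length : Nat) : Int) := by norm_num
    rw [h0, hk]
    have := foldB_inv minutes (x0 :: rest) [] [] 0 x0.2 (by simp)
    simp only [List.nil_append] at this ⊢
    rw [this]
    simp [segsI]
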